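-- pv_equiv track=rewrite | github.com/manuel100472191/Practica2Heuristica | ejemplo.py | create_vehicle_domains
-- ===== SOURCE A (Python) =====
-- def create_vehicle_domains(parking_matrix, electric_places, vehicles):
--     # Crea un diccionario donde las claves son vehículos y los valores son las plazas disponibles para ese vehículo
--     vehicle_domains = {}
--
--     for vehicle_id, vehicle_type, vehicle_cooler in vehicles:
--         valid_parking_places = []
--
--         for i in range(len(parking_matrix)):
--             for j in range(len(parking_matrix[0])):
--                 place_coordinates = (i + 1, j + 1)
--                 if place_coordinates in electric_places or vehicle_cooler == 'X':
--                     valid_parking_places.append(place_coordinates)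
--
--         vehicle_domains[vehicle_id] = valid_parking_places
--
--     return vehicle_domains
-- ===== SOURCE B (Python) =====
-- def create_vehicle_domains(parking_matrix, electric_places, vehicles):
--     # Bucket the electric places by row once (dedup via sets), emit them in sorted
--     # (row, col) order, and reuse the two precomputed domains for every vehicle,
--     # instead of rescanning the whole grid per vehicle with a list-membership test.
--     m = len(parking_matrix)
--     n = len(parking_matrix[0]) if m else 0
--     cols_by_row = {}
--     for r, c in electric_places:
--         if 1 <= r <= m and 1 <= c <= n:
--             cols_by_row.setdefault(r, set()).add(c)
--     electric_domain = [(r, c) for r in sorted(cols_by_row)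
--                        for c in sorted(cols_by_row[r])]
--     all_places = [(i, j) for i in range(1, m + 1) for j in range(1, n + 1)]
--     return {vehicle_id: all_places if vehicle_cooler == 'X' else electric_domain
--             for vehicle_id, vehicle_type, vehicle_cooler in vehicles}
-- ===== Notes on version B (the rewrite author's own statement) =====
-- stated objective: faster
-- what changed: B never rescans the grid per vehicle: it buckets the electric places by row into per-row column sets in one pass over electric_places, emits the electric domain by sorting the row keys and each column set, builds the full grid once, and assigns one of the two precomputed lists to every vehicle.
import Mathlib
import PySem

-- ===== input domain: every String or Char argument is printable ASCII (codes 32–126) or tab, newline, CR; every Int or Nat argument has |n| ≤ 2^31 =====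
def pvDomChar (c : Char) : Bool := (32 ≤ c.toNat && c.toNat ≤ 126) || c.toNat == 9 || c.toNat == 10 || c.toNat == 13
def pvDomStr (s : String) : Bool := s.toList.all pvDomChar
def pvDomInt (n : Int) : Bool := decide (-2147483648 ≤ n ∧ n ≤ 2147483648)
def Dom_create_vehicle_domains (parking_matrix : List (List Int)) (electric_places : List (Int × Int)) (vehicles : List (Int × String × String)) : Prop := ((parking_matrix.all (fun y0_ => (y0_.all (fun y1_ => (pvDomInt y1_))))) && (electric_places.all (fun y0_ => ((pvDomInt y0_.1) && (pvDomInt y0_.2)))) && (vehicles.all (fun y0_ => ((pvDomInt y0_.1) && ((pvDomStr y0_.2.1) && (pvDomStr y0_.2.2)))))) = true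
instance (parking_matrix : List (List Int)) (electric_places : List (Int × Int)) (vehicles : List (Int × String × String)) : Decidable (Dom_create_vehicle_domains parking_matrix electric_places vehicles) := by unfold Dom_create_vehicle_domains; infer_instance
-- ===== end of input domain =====

-- B buckets the electric places by row into per-row column sets in one pass, emits them
-- in sorted (row, col) order, and reuses the two precomputed domains for every vehicle,
-- instead of A's per-vehicle full-grid scan with a list-membership test per cell.

-- ===== PORT A =====
-- Note: Python reads len(parking_matrix[0]) only when the outer range is nonempty;
-- `headD []` is that value whenever it is read (and harmless when the outer range is empty).
def create_vehicle_domains (parking_matrix : List (List Int)) (electric_places : List (Int × Int)) (vehicles : List (Int × String × String)) : List (Int × List (Int × Int)) :=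
  (vehicles.foldl (fun vehicle_domains v =>
    let valid_parking_places : List (Int × Int) :=
      (PySem.List.pyRange 0 (parking_matrix.length : Int)).foldl (fun acc i =>
        (PySem.List.pyRange 0 ((parking_matrix.headD []).length : Int)).foldl (fun acc2 j =>
          let place_coordinates := (i + 1, j + 1)
          if place_coordinates ∈ electric_places ∨ v.2.2 = "X" then acc2 ++ [place_coordinates]
          else acc2) acc) []
    vehicle_domains.insert v.1 valid_parking_places) PySem.Dict.empty).items

-- ===== PORT B =====
-- cols_by_row.setdefault(r, set()).add(c) mutates the stored set in place; as a value map
-- that is: store (getD r ∅).add c at r.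
def create_vehicle_domains_alt (parking_matrix : List (List Int)) (electric_places : List (Int × Int)) (vehicles : List (Int × String × String)) : List (Int × List (Int × Int)) :=
  let m : Nat := parking_matrix.length
  let n : Nat := if m = 0 then 0 else (parking_matrix.headD []).length
  let cols_by_row : PySem.Dict Int (PySem.Set Int) :=
    electric_places.foldl (fun d p =>
      if 1 ≤ p.1 ∧ p.1 ≤ (m : Int) ∧ 1 ≤ p.2 ∧ p.2 ≤ (n : Int) then
        d.insert p.1 (PySem.Set.add (d.getD p.1 PySem.Set.empty) p.2)
      else d) PySem.Dict.empty
  let electric_domain : List (Int × Int) :=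
    (PySem.List.sorted cols_by_row.keys (fun x => x) false).flatMap (fun r =>
      (PySem.List.sorted (cols_by_row.getD r PySem.Set.empty) (fun x => x) false).map (fun c => (r, c)))
  let all_places : List (Int × Int) :=
    (PySem.List.pyRange 1 ((m : Int) + 1)).flatMap (fun i =>
      (PySem.List.pyRange 1 ((n : Int) + 1)).map (fun j => (i, j)))
  (vehicles.foldl (fun d v =>
    d.insert v.1 (if v.2.2 = "X" then all_places else electric_domain)) PySem.Dict.empty).items

-- ===== PRECONDITION & SPEC =====
def Spec_create_vehicle_domains (parking_matrix : List (List Int)) (electric_places : List (Int × Int)) (vehicles : List (Int × String × String)) (out : List (Int × List (Int × Int))) : Prop := out = create_vehicle_domains_alt parking_matrix electric_places vehicles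
instance (parking_matrix : List (List Int)) (electric_places : List (Int × Int)) (vehicles : List (Int × String × String)) (out : List (Int × List (Int × Int))) : Decidable (Spec_create_vehicle_domains parking_matrix electric_places vehicles out) := by unfold Spec_create_vehicle_domains; infer_instance

-- ===== CLAIM (what is proved, stated in full; the proofs are below) =====
def Claim_equal_create_vehicle_domains : Prop := ∀ (parking_matrix : List (List Int)) (electric_places : List (Int × Int)) (vehicles : List (Int × String × String)), Dom_create_vehicle_domains parking_matrix electric_places vehicles → Spec_create_vehicle_domains parking_matrix electric_places vehicles (create_vehicle_domains parking_matrix electric_places vehicles)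

-- ===== LEMMAS AND PROOFS =====

-- strict lexicographic order on coordinate pairs (Python tuple '<')
def pvLex (p q : Int × Int) : Prop := p.1 < q.1 ∨ (p.1 = q.1 ∧ p.2 < q.2)

-- the 1-based row-major grid
def pvGrid (m n : Nat) : List (Int × Int) :=
  (PySem.List.pyRange 1 ((m : Int) + 1)).flatMap (fun i =>
    (PySem.List.pyRange 1 ((n : Int) + 1)).map (fun j => (i, j)))

lemma mem_pvGrid (m n : Nat) (p : Int × Int) :
    p ∈ pvGrid m n ↔ 1 ≤ p.1 ∧ p.1 ≤ (m : Int) ∧ 1 ≤ p.2 ∧ p.2 ≤ (n : Int) := by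
  obtain ⟨a, b⟩ := p
  simp only [pvGrid, List.mem_flatMap, List.mem_map, PySem.List.mem_pyRange_one, Prod.mk.injEq]
  constructor
  · rintro ⟨i, hi, j, hj, rfl, rfl⟩
    exact ⟨hi.1, by omega, hj.1, by omega⟩
  · rintro ⟨h1, h2, h3, h4⟩
    exact ⟨a, ⟨h1, by omega⟩, b, ⟨h3, by omega⟩, rfl, rfl⟩

-- two strictly-lex-sorted lists with the same members are equal
lemma pvLex_eq_of_mem : ∀ {l1 l2 : List (Int × Int)}, l1.Pairwise pvLex → l2.Pairwise pvLex →
    (∀ p, p ∈ l1 ↔ p ∈ l2) → l1 = l2 := by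
  intro l1
  induction l1 with
  | nil =>
      intro l2 _ _ hm
      cases l2 with
      | nil => rfl
      | cons b t2 => exact absurd ((hm b).2 (List.mem_cons_self)) (by simp)
  | cons a t1 ih =>
      intro l2 h1 h2 hm
      cases l2 with
      | nil => exact absurd ((hm a).1 (List.mem_cons_self)) (by simp)
      | cons b t2 =>
          rw [List.pairwise_cons] at h1 h2
          have hab : a = b := by
            have ha : a = b ∨ a ∈ t2 := by
              have := (hm a).1 (List.mem_cons_self); simpa using this
            have hb : b = a ∨ b ∈ t1 := by
              have := (hm b).2 (List.mem_cons_self); simpa using this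
            rcases ha with h | ha
            · exact h
            · rcases hb with h | hb
              · exact h.symm
              · have hba := h2.1 a ha
                have hab := h1.1 b hb
                unfold pvLex at hba hab
                exfalso; omega
          subst hab
          have htm : ∀ p, p ∈ t1 ↔ p ∈ t2 := by
            intro p
            constructor
            · intro hp
              have hpa : p ≠ a := by
                intro h; subst h
                have := h1.1 p hp; unfold pvLex at this; omega
              have := (hm p).1 (List.mem_cons_of_mem _ hp)
              simpa [hpa] using this
            · intro hp
              have hpa : p ≠ a := by
                intro h; subst h
                have := h2.1 p hp; unfold pvLex at this; omega
              have := (hm p).2 (List.mem_cons_of_mem _ hp)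
              simpa [hpa] using this
          rw [ih h1.2 h2.2 htm]

-- a flatMap of strictly increasing columns over strictly increasing rows is lex-sorted
lemma pairwise_lex_flatMap (rows : List Int) (f : Int → List Int)
    (hr : rows.Pairwise (· < ·)) (hf : ∀ r, (f r).Pairwise (· < ·)) :
    (rows.flatMap (fun r => (f r).map (fun c => (r, c)))).Pairwise pvLex := by
  rw [List.pairwise_flatMap]
  refine ⟨?_, ?_⟩
  · intro r _
    rw [List.pairwise_map]
    exact (hf r).imp (fun h => Or.inr ⟨rfl, h⟩)
  · refine hr.imp ?_
    intro r1 r2 h p hp q hq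
    simp only [List.mem_map] at hp hq
    obtain ⟨c1, _, rfl⟩ := hp
    obtain ⟨c2, _, rfl⟩ := hq
    exact Or.inl h

lemma pairwise_lt_pvGrid_rows (m : Nat) : (PySem.List.pyRange 1 ((m : Int) + 1)).Pairwise (· < ·) :=
  PySem.List.pairwise_lt_pyRange_one 1 ((m : Int) + 1)

lemma pairwise_lex_pvGrid (m n : Nat) : (pvGrid m n).Pairwise pvLex :=
  pairwise_lex_flatMap _ _ (pairwise_lt_pvGrid_rows m)
    (fun _ => PySem.List.pairwise_lt_pyRange_one 1 ((n : Int) + 1))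

-- range(1, m+1) is range(0, m) shifted by one
lemma pyRange_one_shift (m : Nat) :
    PySem.List.pyRange 1 ((m : Int) + 1) = (PySem.List.pyRange 0 (m : Int)).map (· + 1) := by
  induction m with
  | zero => decide
  | succ k ih =>
      have h1 : (1 : Int) ≤ (k : Int) + 1 := by omega
      have h0 : (0 : Int) ≤ (k : Int) := by omega
      have e1 : ((k + 1 : Nat) : Int) + 1 = ((k : Int) + 1) + 1 := by push_cast; ring
      have e2 : ((k + 1 : Nat) : Int) = (k : Int) + 1 := by push_cast; ring
      rw [e1, e2, PySem.List.pyRange_one_succ_right h1, PySem.List.pyRange_one_succ_right h0,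
        List.map_append, ih]
      simp

-- A's nested scan for one vehicle: the whole grid for 'X', else the grid filtered by membership
lemma valid_places_eq (m n : Nat) (ep : List (Int × Int)) (c : String) :
    (PySem.List.pyRange 0 (m : Int)).foldl (fun acc i =>
        (PySem.List.pyRange 0 (n : Int)).foldl (fun acc2 j =>
          let place_coordinates := (i + 1, j + 1)
          if place_coordinates ∈ ep ∨ c = "X" then acc2 ++ [place_coordinates]
          else acc2) acc) []
    = (if c = "X" then pvGrid m n else (pvGrid m n).filter (fun p => decide (p ∈ ep))) := by
  have hinner : ∀ (i : Int) (acc : List (Int × Int)),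
      (PySem.List.pyRange 0 (n : Int)).foldl (fun acc2 j =>
        let place_coordinates := (i + 1, j + 1)
        if place_coordinates ∈ ep ∨ c = "X" then acc2 ++ [place_coordinates]
        else acc2) acc
      = acc ++ ((PySem.List.pyRange 0 (n : Int)).filter
          (fun j => decide ((i + 1, j + 1) ∈ ep ∨ c = "X"))).map
          (fun j => (i + 1, j + 1)) := by
    intro i acc
    exact PySem.List.foldl_append_ite
      (fun j => (i + 1, j + 1) ∈ ep ∨ c = "X") (fun j => (i + 1, j + 1)) _ acc
  have houter :
      (PySem.List.pyRange 0 (m : Int)).foldl (fun acc i =>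
        (PySem.List.pyRange 0 (n : Int)).foldl (fun acc2 j =>
          let place_coordinates := (i + 1, j + 1)
          if place_coordinates ∈ ep ∨ c = "X" then acc2 ++ [place_coordinates]
          else acc2) acc) []
      = (PySem.List.pyRange 0 (m : Int)).flatMap (fun i =>
          ((PySem.List.pyRange 0 (n : Int)).filter
            (fun j => decide ((i + 1, j + 1) ∈ ep ∨ c = "X"))).map
            (fun j => (i + 1, j + 1))) := by
    calc (PySem.List.pyRange 0 (m : Int)).foldl (fun acc i =>
            (PySem.List.pyRange 0 (n : Int)).foldl (fun acc2 j =>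
              let place_coordinates := (i + 1, j + 1)
              if place_coordinates ∈ ep ∨ c = "X" then acc2 ++ [place_coordinates]
              else acc2) acc) []
        = (PySem.List.pyRange 0 (m : Int)).foldl (fun acc i =>
            acc ++ ((PySem.List.pyRange 0 (n : Int)).filter
              (fun j => decide ((i + 1, j + 1) ∈ ep ∨ c = "X"))).map
              (fun j => (i + 1, j + 1))) [] := by
          exact PySem.List.foldl_congr_mem _ _ _ _ (fun acc i _ => hinner i acc)
      _ = _ := by
          rw [PySem.List.foldl_append_eq_flatMap]; simp
  rw [houter]
  unfold pvGrid
  rw [pyRange_one_shift m, pyRange_one_shift n]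
  by_cases hc : c = "X"
  · simp [hc, List.flatMap_map, List.map_map, Function.comp_def]
  · simp only [hc, if_false, List.flatMap_map, List.filter_flatMap, List.filter_map,
      List.map_map, Function.comp_def]
    refine List.flatMap_congr (fun i _ => ?_)
    congr 1
    refine List.filter_congr (fun j _ => ?_)
    simp

-- the bucketing loop of B: key/value invariants
lemma pvBuckets_inv (m n : Nat) (l : List (Int × Int)) :
    ∀ d : PySem.Dict Int (PySem.Set Int), d.keys.Nodup →
      (∀ r, (d.getD r PySem.Set.empty).Nodup) →
      (let d' := l.foldl (fun d p =>
          if 1 ≤ p.1 ∧ p.1 ≤ (m : Int) ∧ 1 ≤ p.2 ∧ p.2 ≤ (n : Int) then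
            d.insert p.1 (PySem.Set.add (d.getD p.1 PySem.Set.empty) p.2)
          else d) d
       d'.keys.Nodup ∧ (∀ r, (d'.getD r PySem.Set.empty).Nodup) ∧
       (∀ r c, c ∈ d'.getD r PySem.Set.empty ↔
          c ∈ d.getD r PySem.Set.empty ∨
            ((r, c) ∈ l ∧ 1 ≤ r ∧ r ≤ (m : Int) ∧ 1 ≤ c ∧ c ≤ (n : Int)))) := by
  induction l with
  | nil => intro d hk hv; exact ⟨hk, hv, fun r c => by simp⟩
  | cons p t ih =>
      intro d hk hv
      simp only [List.foldl_cons]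
      by_cases hp : 1 ≤ p.1 ∧ p.1 ≤ (m : Int) ∧ 1 ≤ p.2 ∧ p.2 ≤ (n : Int)
      · rw [if_pos hp]
        obtain ⟨hk', hv', hm'⟩ := ih (d.insert p.1 (PySem.Set.add (d.getD p.1 PySem.Set.empty) p.2))
          (PySem.Dict.nodup_keys_insert _ _ _ hk)
          (by
            intro r
            rw [PySem.Dict.getD_insert]
            split_ifs with h
            · exact PySem.Set.nodup_add _ _ (hv p.1)
            · exact hv r)
        refine ⟨hk', hv', ?_⟩
        intro r c
        rw [hm' r c, PySem.Dict.getD_insert]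
        by_cases hr : r = p.1
        · subst hr
          rw [if_pos rfl, PySem.Set.mem_add]
          constructor
          · rintro ((h | h) | h)
            · exact Or.inl h
            · subst h
              refine Or.inr ⟨?_, hp⟩
              have hpe : (p.1, p.2) = p := rfl
              rw [hpe]
              exact List.mem_cons_self
            · exact Or.inr ⟨List.mem_cons_of_mem _ h.1, h.2⟩
          · rintro (h | ⟨h, hb⟩)
            · exact Or.inl (Or.inl h)
            · rcases List.mem_cons.1 h with hh | hh
              · refine Or.inl (Or.inr ?_)
                rw [Prod.ext_iff] at hh
                exact hh.2
              · exact Or.inr ⟨hh, hb⟩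
        · rw [if_neg hr]
          constructor
          · rintro (h | h)
            · exact Or.inl h
            · exact Or.inr ⟨List.mem_cons_of_mem _ h.1, h.2⟩
          · rintro (h | ⟨h, hb⟩)
            · exact Or.inl h
            · rcases List.mem_cons.1 h with hh | hh
              · exact absurd (by rw [Prod.ext_iff] at hh; exact hh.1) hr
              · exact Or.inr ⟨hh, hb⟩
      · rw [if_neg hp]
        obtain ⟨hk', hv', hm'⟩ := ih d hk hv
        refine ⟨hk', hv', ?_⟩
        intro r c
        rw [hm' r c]
        constructor
        · rintro (h | h)
          · exact Or.inl h
          · exact Or.inr ⟨List.mem_cons_of_mem _ h.1, h.2⟩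
        · rintro (h | ⟨h, hb⟩)
          · exact Or.inl h
          · rcases List.mem_cons.1 h with hh | hh
            · exfalso
              apply hp
              rw [← hh]
              exact hb
            · exact Or.inr ⟨hh, hb⟩

-- B's electric domain equals the grid filtered by membership in electric_places
lemma electric_eq (m n : Nat) (ep : List (Int × Int)) :
    (let cols_by_row : PySem.Dict Int (PySem.Set Int) :=
        ep.foldl (fun d p =>
          if 1 ≤ p.1 ∧ p.1 ≤ (m : Int) ∧ 1 ≤ p.2 ∧ p.2 ≤ (n : Int) then
            d.insert p.1 (PySem.Set.add (d.getD p.1 PySem.Set.empty) p.2)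
          else d) PySem.Dict.empty
     (PySem.List.sorted cols_by_row.keys (fun x => x) false).flatMap (fun r =>
        (PySem.List.sorted (cols_by_row.getD r PySem.Set.empty) (fun x => x) false).map
          (fun c => (r, c))))
    = (pvGrid m n).filter (fun p => decide (p ∈ ep)) := by
  obtain ⟨hk, hv, hm⟩ := pvBuckets_inv m n ep PySem.Dict.empty
    (by simp [PySem.Dict.keys_empty]) (by intro r; simp [PySem.Dict.getD_empty, PySem.Set.empty])
  set d := ep.foldl (fun d p =>
      if 1 ≤ p.1 ∧ p.1 ≤ (m : Int) ∧ 1 ≤ p.2 ∧ p.2 ≤ (n : Int) then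
        d.insert p.1 (PySem.Set.add (d.getD p.1 PySem.Set.empty) p.2)
      else d) PySem.Dict.empty with hd
  apply pvLex_eq_of_mem
  · apply pairwise_lex_flatMap
    · have := PySem.List.sorted_ofList_pairwise_lt (xs := d.keys)
      rwa [PySem.Set.ofList_eq_self_of_nodup _ hk] at this
    · intro r
      have := PySem.List.sorted_ofList_pairwise_lt (xs := (d.getD r PySem.Set.empty : List Int))
      rwa [PySem.Set.ofList_eq_self_of_nodup _ (hv r)] at this
  · exact List.Pairwise.sublist List.filter_sublist (pairwise_lex_pvGrid m n)
  · intro p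
    rw [List.mem_filter, mem_pvGrid]
    have hmem : p ∈ (PySem.List.sorted d.keys (fun x => x) false).flatMap (fun r =>
        (PySem.List.sorted (d.getD r PySem.Set.empty) (fun x => x) false).map (fun c => (r, c)))
        ↔ p.2 ∈ d.getD p.1 PySem.Set.empty := by
      simp only [List.mem_flatMap, List.mem_map, PySem.List.mem_sorted]
      constructor
      · rintro ⟨r, _, c, hc, rfl⟩; exact hc
      · intro h
        refine ⟨p.1, ?_, p.2, h, rfl⟩
        by_contra hnk
        have hcf : d.contains p.1 = false := by
          cases hcc : d.contains p.1
          · rfl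
          · exact absurd ((PySem.Dict.contains_iff_mem_keys d p.1).1 hcc) hnk
        rw [PySem.Dict.getD_of_not_contains d PySem.Set.empty hcf] at h
        simp [PySem.Set.empty] at h
    rw [hmem, hm p.1 p.2]
    simp only [PySem.Dict.getD_empty]
    constructor
    · rintro (h | ⟨h1, h2⟩)
      · simp [PySem.Set.empty] at h
      · exact ⟨⟨h2.1, h2.2.1, h2.2.2⟩, by simpa using h1⟩
    · rintro ⟨hb, hmem2⟩
      exact Or.inr ⟨by simpa using hmem2, hb.1, hb.2.1, hb.2.2⟩

-- the grid A scans equals the grid B builds (B guards n when the matrix is empty)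
lemma grid_guard_eq (m n : Nat) :
    pvGrid m n = pvGrid m (if m = 0 then 0 else n) := by
  by_cases hm : m = 0
  · subst hm; simp [pvGrid]
  · rw [if_neg hm]

-- ===== VERDICT (by name: the statement is the Claim_ definition above) =====
theorem create_vehicle_domains_spec : Claim_equal_create_vehicle_domains := by
  intro pm ep vs _
  unfold Spec_create_vehicle_domains create_vehicle_domains create_vehicle_domains_alt
  simp only []
  congr 1
  apply PySem.List.foldl_congr_mem
  intro d v _
  congr 1
  rw [valid_places_eq pm.length ((pm.headD []).length) ep v.2.2]
  rw [grid_guard_eq pm.length ((pm.headD []).length)]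
  by_cases hc : v.2.2 = "X"
  · rw [if_pos hc, if_pos hc]
    rfl
  · rw [if_neg hc, if_neg hc]
    exact (electric_eq pm.length (if pm.length = 0 then 0 else (pm.headD []).length) ep).symm
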